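-- pv_equiv track=rewrite | github.com/stat-thon/Coding-Test-Study-2nd | Thon/DP_부녀회장이-될테야.py | floor_cnt
-- ===== SOURCE A (Python) =====
-- def floor_cnt(k, n):
--     floor = [i for i in range(1, n + 1)]
--
--     while k:
--
--         temp_copy = floor[:]
--
--         k -= 1
--         for i in range(n):
--             floor[i] = sum(temp_copy[:i + 1])
--
--     return floor[n - 1]
-- ===== SOURCE B (Python) =====
-- def floor_cnt(k, n):
--     # one running prefix-sum pass per iteration: O(k*n) instead of O(k*n^2)
--     floor = list(range(1, n + 1))
--     for _ in range(k):
--         new = []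
--         s = 0
--         for x in floor:
--             s += x
--             new.append(s)
--         floor = new
--     return floor[n - 1]
-- ===== Notes on version B (the rewrite author's own statement) =====
-- stated objective: faster
-- what changed: Each iteration now computes the next row with a single running prefix-sum pass instead of recomputing sum(temp_copy[:i+1]) from scratch for every index, removing the inner quadratic scan.
import Mathlib
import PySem

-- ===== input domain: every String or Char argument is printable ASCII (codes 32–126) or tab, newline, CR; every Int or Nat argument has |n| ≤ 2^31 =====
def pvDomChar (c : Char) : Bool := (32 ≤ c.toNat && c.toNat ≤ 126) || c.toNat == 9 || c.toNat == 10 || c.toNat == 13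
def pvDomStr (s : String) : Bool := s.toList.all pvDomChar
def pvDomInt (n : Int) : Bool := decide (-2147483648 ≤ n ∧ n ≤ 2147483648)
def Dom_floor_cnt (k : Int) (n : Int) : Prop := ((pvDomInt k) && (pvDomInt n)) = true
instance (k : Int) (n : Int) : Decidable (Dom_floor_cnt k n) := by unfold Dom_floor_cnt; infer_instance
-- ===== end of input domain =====

-- B replaces A's per-index slice-and-sum (O(k*n^2)) by one running prefix-sum pass per iteration (O(k*n)).

-- ===== PORT A =====
-- inner 'for i in range(n): floor[i] = sum(temp_copy[:i+1])'
def floorInnerA (n : Int) (temp : List Int) (fl : List Int) : List Int :=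
  (PySem.List.pyRange 0 n 1).foldl
    (fun fl i => fl.set i.toNat ((PySem.List.slice temp (some 0) (some (i + 1))).foldl (· + ·) 0))
    fl

-- 'while k: temp_copy = floor[:]; k -= 1; <inner loop>'.
-- Guard is 0 < k: for k < 0 the Python loop never terminates (outside Pre_).
def floorLoopA (k : Int) (fl : List Int) (n : Int) : List Int :=
  if h : 0 < k then floorLoopA (k - 1) (floorInnerA n fl fl) n
  else fl
termination_by k.toNat
decreasing_by omega

def floor_cnt (k : Int) (n : Int) : Int :=
  let floor := PySem.List.pyRange 1 (n + 1) 1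
  let floor := floorLoopA k floor n
  -- floor[n-1]; the IndexError case (n < 1) is outside Pre_
  PySem.List.pyGetD floor (n - 1) 0

-- ===== PORT B =====
-- one running prefix-sum pass: 's = 0; for x in floor: s += x; new.append(s)'
def scanB (fl : List Int) : List Int :=
  (fl.foldl (fun (p : Int × List Int) x => (p.1 + x, p.2 ++ [p.1 + x])) (0, [])).2

def floor_cnt_alt (k : Int) (n : Int) : Int :=
  let floor := PySem.List.pyRange 1 (n + 1) 1
  let floor := (PySem.List.pyRange 0 k 1).foldl (fun fl _ => scanB fl) floor
  -- floor[n-1]; the IndexError case (n < 1) is outside Pre_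
  PySem.List.pyGetD floor (n - 1) 0

-- ===== PRECONDITION & SPEC =====
-- A raises IndexError for n < 1 (empty floor) and never terminates for k < 0; both are excluded.
def Pre_floor_cnt (k : Int) (n : Int) : Prop := 1 ≤ n ∧ 0 ≤ k
instance (k : Int) (n : Int) : Decidable (Pre_floor_cnt k n) := by unfold Pre_floor_cnt; infer_instance
def pvWitness_floor_cnt : Int × Int := (3, 4)

def Spec_floor_cnt (k : Int) (n : Int) (out : Int) : Prop := out = floor_cnt_alt k n
instance (k : Int) (n : Int) (out : Int) : Decidable (Spec_floor_cnt k n out) := by unfold Spec_floor_cnt; infer_instance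

-- ===== CLAIM (what is proved, stated in full; the proofs are below) =====
def Claim_equal_floor_cnt : Prop := ∀ (k : Int) (n : Int), Dom_floor_cnt k n → Pre_floor_cnt k n → Spec_floor_cnt k n (floor_cnt k n)

-- ===== LEMMAS AND PROOFS =====

-- reference prefix-sum list
def presum (s : Int) : List Int → List Int
  | [] => []
  | x :: xs => (s + x) :: presum (s + x) xs

-- sum(temp[:j+1])
def sumTake (temp : List Int) (j : Nat) : Int := (temp.take (j + 1)).foldl (· + ·) 0

theorem presum_length (xs : List Int) : ∀ s, (presum s xs).length = xs.length := by
  induction xs with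
  | nil => intro s; rfl
  | cons x xs ih => intro s; simp [presum, ih]

theorem foldl_add_shift (xs : List Int) : ∀ (a b : Int), xs.foldl (· + ·) (a + b) = a + xs.foldl (· + ·) b := by
  induction xs with
  | nil => intro a b; rfl
  | cons x xs ih => intro a b; simp only [List.foldl_cons]; rw [add_assoc, ih]

theorem presum_getElem? (xs : List Int) : ∀ (s : Int) (j : Nat), j < xs.length →
    (presum s xs)[j]? = some (s + sumTake xs j) := by
  induction xs with
  | nil => intro s j h; simp at h
  | cons x xs ih =>
    intro s j h
    cases j with
    | zero => simp [presum, sumTake]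
    | succ j =>
      simp only [presum, List.getElem?_cons_succ]
      rw [ih (s + x) j (by simpa using h)]
      have : sumTake (x :: xs) (j + 1) = x + sumTake xs j := by
        simp only [sumTake, List.take_succ_cons, List.foldl_cons]
        have := foldl_add_shift (xs.take (j + 1)) x 0
        simpa using this
      rw [this]; ring_nf

theorem scanB_go (xs : List Int) : ∀ (s : Int) (acc : List Int),
    (xs.foldl (fun (p : Int × List Int) x => (p.1 + x, p.2 ++ [p.1 + x])) (s, acc)).2
      = acc ++ presum s xs := by
  induction xs with
  | nil => intro s acc; simp [presum]
  | cons x xs ih => intro s acc; simp [presum, ih]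

theorem scanB_eq (fl : List Int) : scanB fl = presum 0 fl := by
  simp [scanB, scanB_go]

-- inner loop, after reduction to Nat indices
theorem setfold_length (N : Nat) (temp : List Int) : ∀ (fl : List Int),
    ((List.range N).foldl (fun fl k => fl.set k (sumTake temp k)) fl).length = fl.length := by
  induction N with
  | zero => intro fl; rfl
  | succ N ih => intro fl; rw [List.range_succ]; simp [List.foldl_append, ih]

theorem setfold_getElem? (temp : List Int) : ∀ (N : Nat) (fl : List Int), N ≤ fl.length → ∀ (j : Nat),
    ((List.range N).foldl (fun fl k => fl.set k (sumTake temp k)) fl)[j]?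
      = if j < N then some (sumTake temp j) else fl[j]? := by
  intro N
  induction N with
  | zero => intro fl _ j; simp
  | succ N ih =>
    intro fl hlen j
    rw [List.range_succ, List.foldl_append]
    simp only [List.foldl_cons, List.foldl_nil]
    rw [List.getElem?_set]
    have hplen : ((List.range N).foldl (fun fl k => fl.set k (sumTake temp k)) fl).length = fl.length :=
      setfold_length N temp fl
    by_cases hj : j = N
    · subst hj
      have hjl : j < fl.length := by omega
      simp [hplen, hjl]
    · rw [if_neg (fun h => hj h.symm)]
      rw [ih fl (by omega) j]
      by_cases h2 : j < N
      · rw [if_pos h2, if_pos (Nat.lt_succ_of_lt h2)]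
      · rw [if_neg h2, if_neg (by omega : ¬ j < N + 1)]

theorem innerA_eq (n : Int) (fl : List Int) (hlen : fl.length = n.toNat) :
    floorInnerA n fl fl = presum 0 fl := by
  unfold floorInnerA
  rw [PySem.List.pyRange_one]
  rw [List.foldl_map]
  have hstep : (fun (l : List Int) (k : Nat) =>
        l.set ((0 : Int) + k).toNat ((PySem.List.slice fl (some 0) (some ((0 : Int) + k + 1))).foldl (· + ·) 0))
      = fun (l : List Int) (k : Nat) => l.set k (sumTake fl k) := by
    funext l k
    rw [show ((0 : Int) + (k : Int)).toNat = k by omega,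
        show (0 : Int) + (k : Int) + 1 = ((k + 1 : Nat) : Int) by push_cast; ring,
        PySem.List.slice_zero_start, PySem.List.slice_to_natCast]
    rfl
  rw [hstep]
  have hN : ((n : Int) - 0).toNat = n.toNat := by omega
  rw [hN]
  apply List.ext_getElem?
  intro j
  rw [setfold_getElem? fl n.toNat fl (by omega) j]
  by_cases hj : j < n.toNat
  · rw [if_pos hj, presum_getElem? fl 0 j (by omega)]
    ring_nf
  · rw [if_neg hj]
    have h1 : fl[j]? = none := by rw [List.getElem?_eq_none]; omega
    have h2 : (presum 0 fl)[j]? = none := by rw [List.getElem?_eq_none]; rw [presum_length]; omega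
    rw [h1, h2]

theorem loopA_eq (n : Int) : ∀ (j : Nat) (fl : List Int), fl.length = n.toNat →
    floorLoopA (j : Int) fl n = (presum 0)^[j] fl := by
  intro j
  induction j with
  | zero =>
    intro fl _
    rw [floorLoopA]
    simp
  | succ j ih =>
    intro fl hlen
    rw [floorLoopA]
    have hpos : (0 : Int) < ((j + 1 : Nat) : Int) := by positivity
    rw [dif_pos hpos]
    have hk : ((j + 1 : Nat) : Int) - 1 = (j : Int) := by push_cast; ring
    rw [hk, innerA_eq n fl hlen, ih (presum 0 fl) (by rw [presum_length]; exact hlen)]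
    rw [Function.iterate_succ_apply]

theorem foldl_const_iterate {α β : Type} (g : β → β) : ∀ (l : List α) (fl : β),
    l.foldl (fun fl _ => g fl) fl = g^[l.length] fl := by
  intro l
  induction l with
  | nil => intro fl; rfl
  | cons x xs ih => intro fl; simp [ih, Function.iterate_succ_apply]

-- ===== VERDICT (by name: the statement is the Claim_ definition above) =====
theorem floor_cnt_spec : Claim_equal_floor_cnt := by
  intro k n _ hpre
  obtain ⟨hn, hk⟩ := hpre
  unfold Spec_floor_cnt
  have hlen : (PySem.List.pyRange 1 (n + 1) 1).length = n.toNat := by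
    rw [PySem.List.length_pyRange_one]; omega
  have hA : floorLoopA k (PySem.List.pyRange 1 (n + 1) 1) n
      = (presum 0)^[k.toNat] (PySem.List.pyRange 1 (n + 1) 1) := by
    have := loopA_eq n k.toNat (PySem.List.pyRange 1 (n + 1) 1) hlen
    rwa [Int.toNat_of_nonneg hk] at this
  have hB : (PySem.List.pyRange 0 k 1).foldl (fun fl _ => scanB fl) (PySem.List.pyRange 1 (n + 1) 1)
      = (presum 0)^[k.toNat] (PySem.List.pyRange 1 (n + 1) 1) := by
    have hfun : (fun (fl : List Int) (_ : Int) => scanB fl) = fun fl _ => presum 0 fl := by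
      funext fl x; exact scanB_eq fl
    rw [hfun, foldl_const_iterate (presum 0) (PySem.List.pyRange 0 k 1)]
    rw [PySem.List.length_pyRange_one]
    congr 1; omega
  show PySem.List.pyGetD (floorLoopA k (PySem.List.pyRange 1 (n + 1) 1) n) (n - 1) 0
      = PySem.List.pyGetD ((PySem.List.pyRange 0 k 1).foldl (fun fl _ => scanB fl) (PySem.List.pyRange 1 (n + 1) 1)) (n - 1) 0
  rw [hA, hB]
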